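-- pv_equiv track=rewrite | github.com/Githarold/codetree-TILs | 프로그래머스/4/17685. ［3차］ 자동완성/［3차］ 자동완성.py | solution
-- ===== SOURCE A (Python) =====
-- def solution(words):
--     answer = 0
--     words.sort()
--     len_words = len(words)
--
--     def count_chars_for_uniqueness(i, word):
--         count = 1
--         for j in range(len(word)):
--             unique = True
--             if i > 0 and words[i-1][:j+1] == word[:j+1]:
--                 unique = False
--             if i < len_words-1 and words[i+1][:j+1] == word[:j+1]:
--                 unique = False
--             if unique:
--                 return j+1
--         return len(word)
--
--     for i in range(len_words):
--         answer += count_chars_for_uniqueness(i, words[i])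
--
--     return answer
-- ===== SOURCE B (Python) =====
-- def _lcp(a, b):
--     k = 0
--     while k < len(a) and k < len(b) and a[k] == b[k]:
--         k += 1
--     return k
--
--
-- def solution(words):
--     words.sort()
--     lcps = [_lcp(a, b) for a, b in zip(words, words[1:])]
--     total = 0
--     for i, w in enumerate(words):
--         m = 0
--         if i > 0:
--             m = lcps[i - 1]
--         if i < len(lcps) and lcps[i] > m:
--             m = lcps[i]
--         total += min(len(w), m + 1)
--     return total
-- ===== Notes on version B (the rewrite author's own statement) =====
-- stated objective: faster
-- what changed: Replaces the per-word inner loop that re-compares growing prefix slices against both neighbours (quadratic in word length) by one precomputed longest-common-prefix per adjacent sorted pair, so each word contributes min(len(w), max(adjacent lcps)+1) in O(L).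
import Mathlib
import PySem

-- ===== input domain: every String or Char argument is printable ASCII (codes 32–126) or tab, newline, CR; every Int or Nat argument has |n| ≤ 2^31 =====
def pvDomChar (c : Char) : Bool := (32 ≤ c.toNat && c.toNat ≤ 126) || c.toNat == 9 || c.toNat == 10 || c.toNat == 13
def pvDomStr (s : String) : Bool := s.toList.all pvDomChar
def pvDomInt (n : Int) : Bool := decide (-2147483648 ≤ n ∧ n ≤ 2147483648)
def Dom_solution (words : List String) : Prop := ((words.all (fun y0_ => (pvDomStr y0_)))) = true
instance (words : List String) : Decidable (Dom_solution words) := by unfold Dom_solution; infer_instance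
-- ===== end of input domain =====

-- B computes one longest-common-prefix per adjacent sorted pair instead of A's per-word
-- inner scan re-comparing growing prefix slices against both neighbours (objective: faster).
-- Both A and B sort the argument list in place; the equivalence proved here is about the
-- return value (both perform the same mutation).

-- ===== PORT A =====
-- string slices word[:j+1] are ported on the List Char side via PySem.List.slice (exact);
-- A's dead local `count = 1` (never read) is not carried.
def solCountLoop (ws : List String) (n i : Int) (word : String) : List Int → Int
  | [] => PySem.Str.len word
  | j :: rest =>
    let unique : Bool := true
    let unique : Bool :=
      if i > 0 ∧ PySem.List.slice (PySem.List.pyGetD ws (i - 1) "").toList none (some (j + 1))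
                  = PySem.List.slice word.toList none (some (j + 1)) then false else unique
    let unique : Bool :=
      if i < n - 1 ∧ PySem.List.slice (PySem.List.pyGetD ws (i + 1) "").toList none (some (j + 1))
                  = PySem.List.slice word.toList none (some (j + 1)) then false else unique
    if unique then j + 1 else solCountLoop ws n i word rest

def solCount (ws : List String) (n i : Int) (word : String) : Int :=
  solCountLoop ws n i word (PySem.List.pyRange 0 (PySem.Str.len word) 1)

def solution (words : List String) : Int :=
  let ws := PySem.List.sorted words (fun x => x) false
  let len_words : Int := ws.length
  (PySem.List.pyRange 0 len_words 1).foldl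
    (fun answer i => answer + solCount ws len_words i (PySem.List.pyGetD ws i "")) 0

-- ===== PORT B =====
def lcpChars : List Char → List Char → Nat
  | a :: as, b :: bs => if a = b then lcpChars as bs + 1 else 0
  | _, _ => 0

def solution_alt (words : List String) : Int :=
  let ws := PySem.List.sorted words (fun x => x) false
  let lcps : List Int := (ws.zip ws.tail).map (fun p => (lcpChars p.1.toList p.2.toList : Int))
  (PySem.List.enumerate ws 0).foldl
    (fun total p =>
      let i := p.1
      let w := p.2
      let m : Int := 0
      let m : Int := if i > 0 then PySem.List.pyGetD lcps (i - 1) 0 else m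
      let m : Int := if i < (lcps.length : Int) ∧ PySem.List.pyGetD lcps i 0 > m
                     then PySem.List.pyGetD lcps i 0 else m
      total + min (PySem.Str.len w) (m + 1)) 0

-- ===== PRECONDITION & SPEC =====
def Spec_solution (words : List String) (out : Int) : Prop := out = solution_alt words
instance (words : List String) (out : Int) : Decidable (Spec_solution words out) := by unfold Spec_solution; infer_instance

-- ===== CLAIM (what is proved, stated in full; the proofs are below) =====
def Claim_equal_solution : Prop := ∀ (words : List String), Dom_solution words → Spec_solution words (solution words)

-- ===== LEMMAS AND PROOFS =====

theorem lcp_self (a : List Char) : lcpChars a a = a.length := by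
  induction a with
  | nil => rfl
  | cons x as ih => simp [lcpChars, ih]

theorem lcp_comm (a b : List Char) : lcpChars a b = lcpChars b a := by
  induction a generalizing b with
  | nil => cases b <;> simp [lcpChars]
  | cons x as ih =>
    cases b with
    | nil => simp [lcpChars]
    | cons y bs =>
      by_cases h : x = y
      · subst h; simp [lcpChars, ih]
      · simp [lcpChars, h, Ne.symm h]

theorem take_eq_iff (a b : List Char) (k : Nat) :
    a.take k = b.take k ↔ a = b ∨ k ≤ lcpChars a b := by
  induction a generalizing b k with
  | nil =>
    cases b with
    | nil => simp
    | cons y bs =>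
      cases k with
      | zero => simp
      | succ k => simp [lcpChars]
  | cons x as ih =>
    cases b with
    | nil =>
      cases k with
      | zero => simp
      | succ k => simp [lcpChars]
    | cons y bs =>
      cases k with
      | zero => simp
      | succ k =>
        by_cases hxy : x = y
        · subst hxy
          rw [List.take_succ_cons, List.take_succ_cons]
          have hl : lcpChars (x :: as) (x :: bs) = lcpChars as bs + 1 := by simp [lcpChars]
          rw [hl]
          constructor
          · intro h
            rcases (ih bs k).mp (by injection h) with h2 | h2
            · exact Or.inl (by rw [h2])
            · exact Or.inr (by omega)
          · intro h
            have h2 : as = bs ∨ k ≤ lcpChars as bs := by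
              rcases h with h | h
              · exact Or.inl (by injection h)
              · exact Or.inr (by omega)
            rw [(ih bs k).mpr h2]
        · simp [lcpChars, hxy]

-- the branch conditions of A's inner loop at index j, as one proposition
def blockedA (ws : List String) (n i : Int) (word : String) (j : Int) : Prop :=
  (i > 0 ∧ PySem.List.slice (PySem.List.pyGetD ws (i - 1) "").toList none (some (j + 1))
          = PySem.List.slice word.toList none (some (j + 1))) ∨
  (i < n - 1 ∧ PySem.List.slice (PySem.List.pyGetD ws (i + 1) "").toList none (some (j + 1))
          = PySem.List.slice word.toList none (some (j + 1)))

theorem solCountLoop_cons_blocked (ws : List String) (n i : Int) (word : String) (j : Int)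
    (rest : List Int) (h : blockedA ws n i word j) :
    solCountLoop ws n i word (j :: rest) = solCountLoop ws n i word rest := by
  rcases h with h | h
  · by_cases h2 : (i < n - 1 ∧ PySem.List.slice (PySem.List.pyGetD ws (i + 1) "").toList none (some (j + 1))
          = PySem.List.slice word.toList none (some (j + 1))) <;> simp [solCountLoop, h, h2]
  · by_cases h1 : (i > 0 ∧ PySem.List.slice (PySem.List.pyGetD ws (i - 1) "").toList none (some (j + 1))
          = PySem.List.slice word.toList none (some (j + 1))) <;> simp [solCountLoop, h]

theorem solCountLoop_cons_unique (ws : List String) (n i : Int) (word : String) (j : Int)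
    (rest : List Int) (h : ¬ blockedA ws n i word j) :
    solCountLoop ws n i word (j :: rest) = j + 1 := by
  simp only [blockedA, not_or] at h
  simp [solCountLoop, h.1, h.2]

theorem solCountLoop_spec (ws : List String) (n i : Int) (word : String) (M : Nat)
    (hM : ∀ j : Nat, j < word.toList.length → (blockedA ws n i word (j : Int) ↔ j < M)) :
    ∀ s : Nat,
      solCountLoop ws n i word (PySem.List.pyRange (s : Int) (word.toList.length : Int) 1)
      = if max s M < word.toList.length then ((max s M : Nat) : Int) + 1
        else (word.toList.length : Int) := by
  intro s
  by_cases hs : s < word.toList.length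
  case neg =>
    rw [PySem.List.pyRange_one_eq_nil (by exact_mod_cast Nat.le_of_not_lt hs)]
    simp only [solCountLoop, PySem.Str.len_eq]
    rw [if_neg (by omega)]
  case pos =>
    induction hind : word.toList.length - s generalizing s with
    | zero => omega
    | succ t iht =>
      rw [PySem.List.pyRange_one_cons (by exact_mod_cast hs)]
      by_cases hblock : s < M
      · rw [solCountLoop_cons_blocked ws n i word _ _ ((hM s hs).mpr hblock)]
        have hmax : max (s + 1) M = max s M := by omega
        by_cases hs1 : s + 1 < word.toList.length
        · have := iht (s + 1) hs1 (by omega)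
          rw [show ((s : Int) + 1) = ((s + 1 : Nat) : Int) by push_cast; ring, this, hmax]
        · rw [show ((s : Int) + 1) = ((s + 1 : Nat) : Int) by push_cast; ring,
              PySem.List.pyRange_one_eq_nil (by exact_mod_cast Nat.le_of_not_lt hs1)]
          simp only [solCountLoop, PySem.Str.len_eq]
          rw [if_neg (by omega)]
      · rw [solCountLoop_cons_unique ws n i word _ _ (fun h => hblock ((hM s hs).mp h)),
            if_pos (by omega : max s M < word.toList.length),
            show max s M = s by omega]

-- B's neighbour maximum at position k, as a Nat
def nbrM (ws : List String) (k : Nat) : Nat :=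
  max (if 0 < k then lcpChars ((ws.getD (k-1) "").toList) ((ws.getD k "").toList) else 0)
      (if k + 1 < ws.length then lcpChars ((ws.getD k "").toList) ((ws.getD (k+1) "").toList) else 0)

theorem blocked_iff (ws : List String) (k : Nat) (hk : k < ws.length) (j : Nat)
    (hj : j < (ws.getD k "").toList.length) :
    blockedA ws (ws.length : Int) (k : Int) (ws.getD k "") (j : Int) ↔ j < nbrM ws k := by
  have hsl : ∀ (a : List Char), PySem.List.slice a none (some ((j : Int) + 1)) = a.take (j + 1) := by
    intro a
    rw [show ((j : Int) + 1) = ((j + 1 : Nat) : Int) from by push_cast; ring,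
        PySem.List.slice_to_natCast]
  have hclause : ∀ (p : List Char), (p.take (j+1) = (ws.getD k "").toList.take (j+1))
      ↔ j < lcpChars p ((ws.getD k "").toList) := by
    intro p
    rw [take_eq_iff]
    constructor
    · rintro (h | h)
      · rw [h, lcp_self]; omega
      · omega
    · intro h; exact Or.inr (by omega)
  unfold blockedA nbrM
  rw [hsl, hsl, hsl]
  by_cases hk0 : 0 < k <;> by_cases hk1 : k + 1 < ws.length
  · have e1 : PySem.List.pyGetD ws ((k : Int) - 1) "" = ws.getD (k-1) "" := by
      rw [show ((k : Int) - 1) = ((k - 1 : Nat) : Int) from by omega, PySem.List.pyGetD_natCast]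
    have e2 : PySem.List.pyGetD ws ((k : Int) + 1) "" = ws.getD (k+1) "" := by
      rw [show ((k : Int) + 1) = ((k + 1 : Nat) : Int) from by push_cast; ring,
          PySem.List.pyGetD_natCast]
    rw [e1, e2, if_pos hk0, if_pos hk1]
    rw [hclause, hclause,
        lcp_comm ((ws.getD (k+1) "").toList) ((ws.getD k "").toList)]
    constructor
    · rintro (⟨_, h⟩ | ⟨_, h⟩) <;> omega
    · intro h
      by_cases hc : j < lcpChars ((ws.getD (k-1) "").toList) ((ws.getD k "").toList)
      · exact Or.inl ⟨by exact_mod_cast hk0, hc⟩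
      · exact Or.inr ⟨by omega, by omega⟩
  · have e1 : PySem.List.pyGetD ws ((k : Int) - 1) "" = ws.getD (k-1) "" := by
      rw [show ((k : Int) - 1) = ((k - 1 : Nat) : Int) from by omega, PySem.List.pyGetD_natCast]
    rw [e1, if_pos hk0, if_neg hk1]
    rw [hclause]
    constructor
    · rintro (⟨_, h⟩ | ⟨h, _⟩)
      · omega
      · omega
    · intro h
      exact Or.inl ⟨by exact_mod_cast hk0, by omega⟩
  · have e2 : PySem.List.pyGetD ws ((k : Int) + 1) "" = ws.getD (k+1) "" := by
      rw [show ((k : Int) + 1) = ((k + 1 : Nat) : Int) from by push_cast; ring,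
          PySem.List.pyGetD_natCast]
    rw [e2, if_neg hk0, if_pos hk1]
    rw [hclause, hclause, lcp_comm ((ws.getD (k+1) "").toList) ((ws.getD k "").toList)]
    constructor
    · rintro (⟨h, _⟩ | ⟨_, h⟩)
      · omega
      · omega
    · intro h
      exact Or.inr ⟨by omega, by omega⟩
  · rw [if_neg hk0, if_neg hk1]
    constructor
    · rintro (⟨h, _⟩ | ⟨h, _⟩)
      · omega
      · omega
    · intro h; omega

theorem count_eq (ws : List String) (k : Nat) (hk : k < ws.length) :
    solCount ws (ws.length : Int) (k : Int) (ws.getD k "")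
      = min ((ws.getD k "").toList.length : Int) ((nbrM ws k : Nat) + 1 : Int) := by
  unfold solCount
  rw [PySem.Str.len_eq]
  have := solCountLoop_spec ws (ws.length : Int) (k : Int) (ws.getD k "") (nbrM ws k)
    (fun j hj => blocked_iff ws k hk j hj) 0
  rw [show ((0 : Nat) : Int) = (0 : Int) from rfl] at this
  rw [this, show max 0 (nbrM ws k) = nbrM ws k from by omega]
  split_ifs with h <;> omega

theorem lcps_len (ws : List String) :
    ((ws.zip ws.tail).map (fun p => (lcpChars p.1.toList p.2.toList : Int))).length
      = ws.length - 1 := by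
  rw [List.length_map, List.length_zip, List.length_tail]
  omega

theorem lcps_getD (ws : List String) (t : Nat) (ht : t + 1 < ws.length) :
    ((ws.zip ws.tail).map (fun p => (lcpChars p.1.toList p.2.toList : Int))).getD t 0
      = (lcpChars ((ws.getD t "").toList) ((ws.getD (t+1) "").toList) : Int) := by
  have hlen : t < ((ws.zip ws.tail).map (fun p => (lcpChars p.1.toList p.2.toList : Int))).length := by
    rw [lcps_len]; omega
  rw [List.getD_eq_getElem _ _ hlen, List.getElem_map, List.getElem_zip, List.getElem_tail]
  rw [List.getD_eq_getElem _ _ (by omega), List.getD_eq_getElem _ _ (by omega)]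

-- ===== VERDICT (by name: the statement is the Claim_ definition above) =====
theorem solution_spec : Claim_equal_solution := by
  intro words _
  unfold Spec_solution solution solution_alt
  dsimp only
  rw [PySem.List.enumerate_eq_map_pyRange _ "", List.foldl_map]
  simp only [PySem.List.len_eq]
  apply PySem.List.foldl_congr_mem
  intro acc j hj
  rw [PySem.List.mem_pyRange_one] at hj
  obtain ⟨hj0, hjn⟩ := hj
  set ws := PySem.List.sorted words (fun x => x) false with hws
  obtain ⟨k, rfl⟩ : ∃ k : Nat, j = (k : Int) := ⟨j.toNat, (Int.toNat_of_nonneg hj0).symm⟩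
  have hk : k < ws.length := by exact_mod_cast hjn
  rw [PySem.List.pyGetD_natCast, count_eq ws k hk, PySem.Str.len_eq, lcps_len]
  by_cases hk0 : 0 < k
  · have e1 : PySem.List.pyGetD
        ((ws.zip ws.tail).map (fun p => (lcpChars p.1.toList p.2.toList : Int))) ((k : Int) - 1) 0
        = (lcpChars ((ws.getD (k-1) "").toList) ((ws.getD k "").toList) : Int) := by
      rw [show ((k : Int) - 1) = ((k - 1 : Nat) : Int) from by omega, PySem.List.pyGetD_natCast,
          lcps_getD ws (k-1) (by omega), show k - 1 + 1 = k from by omega]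
    rw [e1, if_pos (show (k : Int) > 0 from by exact_mod_cast hk0)]
    by_cases hk1 : k + 1 < ws.length
    · have e2 : PySem.List.pyGetD
          ((ws.zip ws.tail).map (fun p => (lcpChars p.1.toList p.2.toList : Int))) (k : Int) 0
          = (lcpChars ((ws.getD k "").toList) ((ws.getD (k+1) "").toList) : Int) := by
        rw [PySem.List.pyGetD_natCast, lcps_getD ws k hk1]
      rw [e2]
      simp only [nbrM, if_pos hk0, if_pos hk1]
      split_ifs with h <;> omega
    · simp only [nbrM, if_pos hk0, if_neg hk1]
      split_ifs with h
      · exact absurd h.1 (by omega)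
      · omega
  · rw [if_neg (show ¬ ((k : Int) > 0) from by omega)]
    by_cases hk1 : k + 1 < ws.length
    · have e2 : PySem.List.pyGetD
          ((ws.zip ws.tail).map (fun p => (lcpChars p.1.toList p.2.toList : Int))) (k : Int) 0
          = (lcpChars ((ws.getD k "").toList) ((ws.getD (k+1) "").toList) : Int) := by
        rw [PySem.List.pyGetD_natCast, lcps_getD ws k hk1]
      rw [e2]
      simp only [nbrM, if_neg hk0, if_pos hk1]
      split_ifs with h <;> omega
    · simp only [nbrM, if_neg hk0, if_neg hk1]
      split_ifs with h
      · exact absurd h.1 (by omega)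
      · omega
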